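-- pv_equiv track=rewrite | github.com/Dmitriy83/httpconnector-translations | scripts/migrate.py | split_kv
-- ===== SOURCE A (Python) =====
-- def split_kv(line: str):
--     """Split a properties line into (key, value). Return None if not a kv line.
--
--     Handles escape sequences \\=, \\:, \\<space> in keys.
--     """
--     i = 0
--     while i < len(line):
--         if line[i] == "\\" and i + 1 < len(line):
--             i += 2
--             continue
--         if line[i] == "=":
--             return line[:i], line[i + 1:]
--         i += 1
--     return None
-- ===== SOURCE B (Python) =====
-- import re
--
-- _KV = re.compile(r'((?:\\.|[^=\\])*)=(.*)', re.DOTALL)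
--
--
-- def split_kv(line: str):
--     """Split a properties line into (key, value). Return None if not a kv line.
--
--     Handles escape sequences \\=, \\:, \\<space> in keys.
--     """
--     m = _KV.match(line)
--     return (m.group(1), m.group(2)) if m else None
-- ===== Notes on version B (the rewrite author's own statement) =====
-- stated objective: idiomatic
-- what changed: Replaced the manual index loop with a single precompiled regex match (DOTALL): the key group alternates escape pairs and characters that are neither equals sign nor backslash, so the match stops at the first unescaped equals sign.
import Mathlib
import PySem

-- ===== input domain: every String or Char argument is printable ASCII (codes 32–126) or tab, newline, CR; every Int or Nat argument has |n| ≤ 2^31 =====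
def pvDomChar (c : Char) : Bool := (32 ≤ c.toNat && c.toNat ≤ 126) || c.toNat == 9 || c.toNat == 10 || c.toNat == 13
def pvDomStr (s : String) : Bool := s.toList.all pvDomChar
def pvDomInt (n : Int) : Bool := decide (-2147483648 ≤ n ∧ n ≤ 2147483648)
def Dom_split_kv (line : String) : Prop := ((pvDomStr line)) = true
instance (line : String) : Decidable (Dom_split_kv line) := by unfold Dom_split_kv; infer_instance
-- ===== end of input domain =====

-- B replaces A's manual index loop with a single regex match (idiomatic); same O(n) cost.

-- ===== PORT A =====
-- A's while loop over the index i: skip escape pairs, split at the first unescaped '='.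
def splitKvLoopA (cs : List Char) (i : Nat) : Option (String × String) :=
  if hi : i < cs.length then
    if cs.getD i ' ' = '\\' ∧ i + 1 < cs.length then
      splitKvLoopA cs (i + 2)
    else if cs.getD i ' ' = '=' then
      -- line[:i], line[i+1:]
      some (String.mk (cs.take i), String.mk (cs.drop (i + 1)))
    else
      splitKvLoopA cs (i + 1)
  else
    none
termination_by cs.length - i

def split_kv (line : String) : Option (String × String) :=
  splitKvLoopA line.toList 0

-- ===== PORT B =====
-- Hand-port of B's regex r'((?:\\.|[^=\=\\])*)=(.*)' (DOTALL), matched greedily from the start: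
-- the key group repeatedly consumes an escape pair '\.' or a non-'=' non-'\' character, then '='
-- must follow and '(.*)' captures the rest. This greedy matcher is exact for this regex: neither
-- alternative of the starred group can consume an unescaped '=', so no backtracking can change
-- whether or where the match succeeds. The key is accumulated back-to-front and reversed at the end.
def splitKvMatchB (cs : List Char) (acc : List Char) : Option (String × String) :=
  match cs with
  | [] => none
  | '\\' :: [] => none
  | '\\' :: c :: rest => splitKvMatchB rest (c :: '\\' :: acc)
  | '=' :: rest => some (String.mk acc.reverse, String.mk rest)
  | c :: rest => if c = '\\' then none else splitKvMatchB rest (c :: acc)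

def split_kv_alt (line : String) : Option (String × String) :=
  splitKvMatchB line.toList []

-- ===== PRECONDITION & SPEC =====
def Spec_split_kv (line : String) (out : Option (String × String)) : Prop := out = split_kv_alt line
instance (line : String) (out : Option (String × String)) : Decidable (Spec_split_kv line out) := by unfold Spec_split_kv; infer_instance

-- ===== CLAIM (what is proved, stated in full; the proofs are below) =====
def Claim_equal_split_kv : Prop := ∀ (line : String), Dom_split_kv line → Spec_split_kv line (split_kv line)

-- ===== LEMMAS AND PROOFS =====

-- The catch-all arm of B's matcher: an ordinary character is consumed into the accumulator.
theorem matchB_cons (c : Char) (rest acc : List Char) (h1 : c ≠ '\\') (h2 : c ≠ '=') :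
    splitKvMatchB (c :: rest) acc = splitKvMatchB rest (c :: acc) := by
  rw [splitKvMatchB.eq_def]
  rcases rest with _ | ⟨d, rest⟩ <;> simp [h1, h2]

-- Loop invariant: A's loop at index i behaves like B's matcher on the remaining suffix with
-- the processed prefix (reversed) as accumulator.
theorem splitKv_loop_eq (n : Nat) : ∀ (cs : List Char) (i : Nat), cs.length - i ≤ n →
    splitKvLoopA cs i = splitKvMatchB (cs.drop i) (cs.take i).reverse := by
  induction n with
  | zero =>
    intro cs i h
    have hle : cs.length ≤ i := by omega
    rw [splitKvLoopA]
    simp [List.drop_eq_nil_of_le hle, splitKvMatchB, Nat.not_lt.mpr hle]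
  | succ n ih =>
    intro cs i h
    rw [splitKvLoopA]
    by_cases hi : i < cs.length
    · have hdrop : cs.drop i = cs[i] :: cs.drop (i + 1) := (List.getElem_cons_drop hi).symm
      have hgetD : cs.getD i ' ' = cs[i] := List.getD_eq_getElem cs ' ' hi
      have htake : (cs.take (i + 1)) = cs.take i ++ [cs[i]] := by
        rw [List.take_succ]; simp [List.getElem?_eq_getElem hi]
      by_cases hbs : cs[i] = '\\'
      · by_cases hnext : i + 1 < cs.length
        · -- escape pair: A jumps by 2, B consumes two characters
          have hdrop2 : cs.drop (i + 1) = cs[i + 1] :: cs.drop (i + 2) :=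
            (List.getElem_cons_drop hnext).symm
          have htake2 : (cs.take (i + 2)) = cs.take (i + 1) ++ [cs[i + 1]] := by
            rw [List.take_succ]; simp [List.getElem?_eq_getElem hnext]
          simp only [hi, dif_pos, hgetD, hbs, hnext, and_self, if_true]
          rw [ih cs (i + 2) (by omega), hdrop, htake2, htake, hbs]
          conv_rhs => rw [hdrop2]
          simp only [splitKvMatchB, List.reverse_append, List.reverse_cons, List.reverse_nil,
            List.nil_append, List.cons_append]
        · -- lone trailing backslash: A steps to i+1 = length and exits with none
          have hlen : i + 1 = cs.length := by omega
          simp only [hi, dif_pos, hgetD, hbs, hnext, and_false, if_false]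
          have hne : ('\\' : Char) ≠ '=' := by decide
          simp only [if_neg hne]
          rw [ih cs (i + 1) (by omega), hdrop]
          have : cs.drop (i + 1) = [] := List.drop_eq_nil_of_le (by omega)
          rw [this, hbs]
          simp [splitKvMatchB]
      · by_cases heq : cs[i] = '='
        · -- unescaped '=': both return (prefix, suffix)
          simp only [hi, dif_pos, hgetD, heq, if_pos rfl]
          rw [hdrop, heq]
          simp [splitKvMatchB]
        · -- ordinary character: both consume one char
          simp only [hi, dif_pos, hgetD, hbs, false_and, if_false, if_neg heq]
          rw [ih cs (i + 1) (by omega), hdrop,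
            matchB_cons cs[i] (cs.drop (i + 1)) (cs.take i).reverse hbs heq, htake]
          simp only [List.reverse_append, List.reverse_cons, List.reverse_nil,
            List.nil_append, List.cons_append]
    · have hle : cs.length ≤ i := by omega
      simp [hi, List.drop_eq_nil_of_le hle, splitKvMatchB]

-- ===== VERDICT (by name: the statement is the Claim_ definition above) =====
theorem split_kv_spec : Claim_equal_split_kv := by
  intro line _
  unfold Spec_split_kv split_kv split_kv_alt
  simpa using splitKv_loop_eq line.toList.length line.toList 0 (by omega)
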